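-- pv_equiv track=rewrite | github.com/sohyun215/algorithm | programmers/lv2/멀리_뛰기.py | solution
-- ===== SOURCE A (Python) =====
-- from math import factorial
--
-- def solution(n):
--     answer = 0
--     ran = n // 2
--     for i in range(ran+1):
--         cnt_1 = n - (2*i)
--         cnt_total = cnt_1 + i
--         answer += factorial(cnt_total) // (factorial(cnt_1)*factorial(i))
--     return answer % 1234567
-- ===== SOURCE B (Python) =====
-- def solution(n):
--     if n < 0:
--         return 0
--     a, b = 1, 1
--     for _ in range(n):
--         a, b = b, (a + b) % 1234567
--     return a
-- ===== Notes on version B (the rewrite author's own statement) =====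
-- stated objective: faster
-- what changed: Replaced the binomial-coefficient summation (factorials recomputed for every i) by an iterative two-variable Fibonacci recurrence with modular reduction at each step.
import Mathlib
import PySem

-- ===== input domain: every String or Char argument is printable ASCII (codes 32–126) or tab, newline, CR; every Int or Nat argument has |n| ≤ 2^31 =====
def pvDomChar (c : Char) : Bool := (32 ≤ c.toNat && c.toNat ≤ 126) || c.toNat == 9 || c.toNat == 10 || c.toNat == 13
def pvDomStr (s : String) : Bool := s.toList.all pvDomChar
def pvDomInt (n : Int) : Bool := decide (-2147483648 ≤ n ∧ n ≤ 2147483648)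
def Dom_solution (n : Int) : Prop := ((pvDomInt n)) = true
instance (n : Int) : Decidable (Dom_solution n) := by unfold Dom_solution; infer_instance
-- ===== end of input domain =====

-- B replaces A's sum of binomial coefficients (built from factorials) by an iterative
-- Fibonacci recurrence with per-step modular reduction (objective: faster).

-- ===== PORT A =====
-- math.factorial; A only ever calls it on nonnegative arguments (the loop body only runs when n ≥ 0)
def pyFact (k : Int) : Int := (Nat.factorial k.toNat : Int)

def solution (n : Int) : Int :=
  let ran := PySem.Int.floordiv n 2
  let answer := (PySem.List.pyRange 0 (ran + 1) 1).foldl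
    (fun answer i =>
      let cnt_1 := n - 2 * i
      let cnt_total := cnt_1 + i
      answer + PySem.Int.floordiv (pyFact cnt_total) (pyFact cnt_1 * pyFact i)) 0
  PySem.Int.mod answer 1234567

-- ===== PORT B =====
def solution_alt (n : Int) : Int :=
  if n < 0 then 0
  else
    let p := (List.range n.toNat).foldl
      (fun (p : Int × Int) _ => (p.2, PySem.Int.mod (p.1 + p.2) 1234567)) (1, 1)
    p.1

-- ===== PRECONDITION & SPEC =====
def Spec_solution (n : Int) (out : Int) : Prop := out = solution_alt n
instance (n : Int) (out : Int) : Decidable (Spec_solution n out) := by unfold Spec_solution; infer_instance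

-- ===== CLAIM (what is proved, stated in full; the proofs are below) =====
def Claim_equal_solution : Prop := ∀ (n : Int), Dom_solution n → Spec_solution n (solution n)

-- ===== LEMMAS AND PROOFS =====

theorem list_range_map_sum (m : Nat) (f : Nat → Int) :
    ((List.range m).map f).sum = ∑ i ∈ Finset.range m, f i := by
  induction m with
  | zero => simp
  | succ m ih => rw [List.range_succ, List.map_append, List.sum_append,
      Finset.sum_range_succ, ih]; simp

-- ∑_{i ≤ N/2} C(N-i, i) = fib (N+1)
theorem sum_choose_eq_fib (N : Nat) :
    ∑ i ∈ Finset.range (N / 2 + 1), (N - i).choose i = Nat.fib (N + 1) := by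
  have hext : ∑ i ∈ Finset.range (N / 2 + 1), (N - i).choose i
      = ∑ i ∈ Finset.range (N + 1), (N - i).choose i := by
    apply Finset.sum_subset
    · intro x hx
      simp only [Finset.mem_range] at hx ⊢
      omega
    intro i hi hni
    simp only [Finset.mem_range, not_lt] at hi hni
    exact Nat.choose_eq_zero_of_lt (by omega)
  rw [hext, Nat.fib_succ_eq_sum_choose, Finset.Nat.sum_antidiagonal_eq_sum_range_succ_mk]
  rw [← Finset.sum_range_reflect (fun k => Nat.choose k (N - k)) (N + 1)]
  apply Finset.sum_congr rfl
  intro i hi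
  simp only [Finset.mem_range] at hi
  congr 1; omega

-- one loop term of A equals a binomial coefficient
theorem termA_eq_choose (N k : Nat) (hk : k ≤ N / 2) :
    PySem.Int.floordiv (pyFact ((N : Int) - 2 * (k : Int) + (k : Int)))
      (pyFact ((N : Int) - 2 * (k : Int)) * pyFact (k : Int))
      = ((N - k).choose k : Int) := by
  have h2k : 2 * k ≤ N := by omega
  have h1 : ((N : Int) - 2 * (k : Int) + (k : Int)).toNat = N - k := by omega
  have h2 : ((N : Int) - 2 * (k : Int)).toNat = N - 2 * k := by omega
  have h3 : ((k : Int)).toNat = k := by omega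
  simp only [pyFact, h1, h2, h3]
  rw [← Nat.cast_mul, PySem.Int.floordiv_natCast]
  congr 1
  rw [Nat.choose_eq_factorial_div_factorial (by omega : k ≤ N - k)]
  have h4 : N - k - k = N - 2 * k := by omega
  rw [h4, Nat.mul_comm]

-- zeta-reduced body of A's port
theorem solution_body (n : Int) :
    solution n = PySem.Int.mod
      ((PySem.List.pyRange 0 (PySem.Int.floordiv n 2 + 1) 1).foldl
        (fun answer i => answer +
          PySem.Int.floordiv (pyFact (n - 2 * i + i)) (pyFact (n - 2 * i) * pyFact i)) 0)
      1234567 := rfl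

-- A's value on nonnegative input
theorem solution_nonneg (N : Nat) :
    solution (N : Int) = PySem.Int.mod (Nat.fib (N + 1) : Int) 1234567 := by
  rw [solution_body]
  have hran : PySem.Int.floordiv (N : Int) 2 = ((N / 2 : Nat) : Int) := by
    exact_mod_cast PySem.Int.floordiv_natCast N 2
  rw [hran]
  have hrange : PySem.List.pyRange 0 (((N / 2 : Nat) : Int) + 1) 1
      = List.map (fun k : Nat => (k : Int)) (List.range (N / 2 + 1)) := by
    have h : (((N / 2 : Nat) : Int) + 1) = ((N / 2 + 1 : Nat) : Int) := by push_cast; ring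
    rw [h]
    exact PySem.List.pyRange_zero_natCast _
  rw [hrange, List.foldl_map, PySem.List.foldl_add, list_range_map_sum]
  have hsum : ∑ i ∈ Finset.range (N / 2 + 1),
      (fun y : Nat => PySem.Int.floordiv (pyFact ((N : Int) - 2 * (y : Int) + (y : Int)))
          (pyFact ((N : Int) - 2 * (y : Int)) * pyFact (y : Int))) i
      = ((Nat.fib (N + 1) : Nat) : Int) := by
    rw [← sum_choose_eq_fib N, Nat.cast_sum]
    apply Finset.sum_congr rfl
    intro i hi
    simp only [Finset.mem_range] at hi
    exact termA_eq_choose N i (by omega)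
  rw [hsum, zero_add]

-- B's loop invariant
theorem fib_loop (k : Nat) :
    (List.range k).foldl
      (fun (p : Int × Int) _ => (p.2, PySem.Int.mod (p.1 + p.2) 1234567)) (1, 1)
      = (PySem.Int.mod (Nat.fib (k + 1) : Int) 1234567,
         PySem.Int.mod (Nat.fib (k + 2) : Int) 1234567) := by
  induction k with
  | zero => decide
  | succ k ih =>
    rw [List.range_succ, List.foldl_append, ih]
    simp only [List.foldl_cons, List.foldl_nil]
    refine congrArg₂ Prod.mk rfl ?_
    simp only [PySem.Int.mod_eq_emod_of_pos (show (0:Int) < 1234567 by norm_num)]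
    rw [← Int.add_emod]
    congr 1
    have h5 : Nat.fib (k + 1 + 2) = Nat.fib (k + 1) + Nat.fib (k + 2) := Nat.fib_add_two
    rw [h5]; push_cast; ring

theorem solution_alt_nonneg (N : Nat) :
    solution_alt (N : Int) = PySem.Int.mod (Nat.fib (N + 1) : Int) 1234567 := by
  unfold solution_alt
  rw [if_neg (by omega)]
  simp only [Int.toNat_natCast, fib_loop]

-- A on negative input: the loop range is empty
theorem solution_neg (n : Int) (h : n < 0) : solution n = 0 := by
  rw [solution_body]
  have hr : PySem.Int.floordiv n 2 + 1 ≤ 0 := by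
    have h2 := (PySem.Int.floordiv_lt_iff_lt_mul (a := n) (b := 2) (q := 0)
      (by norm_num)).mpr (by omega)
    omega
  rw [PySem.List.pyRange_one_eq_nil hr]
  simp [PySem.Int.mod]

-- ===== VERDICT (by name: the statement is the Claim_ definition above) =====
theorem solution_spec : Claim_equal_solution := by
  intro n _
  unfold Spec_solution
  rcases lt_or_ge n 0 with h | h
  · rw [solution_neg n h]
    unfold solution_alt
    rw [if_pos h]
  · obtain ⟨N, rfl⟩ := Int.eq_ofNat_of_zero_le h
    rw [solution_nonneg, solution_alt_nonneg]
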